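-- pv_equiv track=rewrite | github.com/need-singularity/sylvian-singularity | math/investigate_R_distribution.py | compute_arithmetic_functions
-- ===== SOURCE A (Python) =====
-- def compute_arithmetic_functions(N):
--     """Compute sigma(n), phi(n), tau(n) for n=0..N using sieves."""
--     sigma = [0] * (N + 1)  # sum of divisors
--     phi = list(range(N + 1))  # Euler totient (init to n)
--     tau = [0] * (N + 1)  # number of divisors
--
--     # tau and sigma by sieving
--     for d in range(1, N + 1):
--         for multiple in range(d, N + 1, d):
--             tau[multiple] += 1
--             sigma[multiple] += d
--
--     # phi by sieving with smallest prime factor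
--     spf = list(range(N + 1))  # smallest prime factor
--     for i in range(2, int(N**0.5) + 1):
--         if spf[i] == i:  # i is prime
--             for j in range(i * i, N + 1, i):
--                 if spf[j] == j:
--                     spf[j] = i
--
--     # Compute phi using factorization via spf
--     phi[0] = 0
--     phi[1] = 1
--     for n in range(2, N + 1):
--         if spf[n] == n:  # n is prime
--             phi[n] = n - 1
--         else:
--             p = spf[n]
--             m = n // p
--             if m % p == 0:
--                 phi[n] = phi[m] * p
--             else:
--                 phi[n] = phi[m] * (p - 1)
--
--     return sigma, phi, tau
-- ===== SOURCE B (Python) =====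
-- def compute_arithmetic_functions(N):
--     """Compute sigma(n), phi(n), tau(n) for n=0..N multiplicatively: a smallest-prime-factor
--     sieve, then one pass computing all three from the spf prime-power decomposition."""
--     spf = list(range(N + 1))  # smallest prime factor (no float sqrt bound needed)
--     for i in range(2, N + 1):
--         if spf[i] == i:
--             for j in range(i * i, N + 1, i):
--                 if spf[j] == j:
--                     spf[j] = i
--
--     sigma = []
--     phi = []
--     tau = []
--     pp = []  # pp[n] = largest power of spf[n] dividing n
--     for n in range(N + 1):
--         if n == 0:
--             sigma.append(0); phi.append(0); tau.append(0); pp.append(0)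
--         elif n == 1:
--             sigma.append(1); phi.append(1); tau.append(1); pp.append(1)
--         else:
--             p = spf[n]
--             m = n // p
--             q = pp[m] * p if m % p == 0 else p
--             pp.append(q)
--             if q == n:  # n = p^e is a prime power, m = p^(e-1)
--                 sigma.append(sigma[m] + n)
--                 phi.append(n - m)
--                 tau.append(tau[m] + 1)
--             else:  # n = q * r with r = n // q coprime to q; all three are multiplicative
--                 r = n // q
--                 sigma.append(sigma[r] * sigma[q])
--                 phi.append(phi[r] * phi[q])
--                 tau.append(tau[r] * tau[q])
--     return sigma, phi, tau
-- ===== Notes on version B (the rewrite author's own statement) =====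
-- stated objective: faster
-- what changed: sigma and tau are no longer sieved over all multiples of every d (O(N log N)); B runs the smallest-prime-factor sieve once (dropping the float sqrt bound) and then computes sigma, phi and tau together in one O(N) pass from the spf prime-power decomposition, using their multiplicativity; result lists are grown by append.
-- crash fix: For N <= 0 A raises (TypeError from int(N**0.5) on N < 0, IndexError from the assignment phi[1] = 1 when N = 0) while B returns the natural sieves over the empty/one-element range: ([0],[0],[0]) at N = 0 and ([],[],[]) for N < 0. — e.g. on compute_arithmetic_functions(0): A raises IndexError, B returns ([0], [0], [0])
import Mathlib
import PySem

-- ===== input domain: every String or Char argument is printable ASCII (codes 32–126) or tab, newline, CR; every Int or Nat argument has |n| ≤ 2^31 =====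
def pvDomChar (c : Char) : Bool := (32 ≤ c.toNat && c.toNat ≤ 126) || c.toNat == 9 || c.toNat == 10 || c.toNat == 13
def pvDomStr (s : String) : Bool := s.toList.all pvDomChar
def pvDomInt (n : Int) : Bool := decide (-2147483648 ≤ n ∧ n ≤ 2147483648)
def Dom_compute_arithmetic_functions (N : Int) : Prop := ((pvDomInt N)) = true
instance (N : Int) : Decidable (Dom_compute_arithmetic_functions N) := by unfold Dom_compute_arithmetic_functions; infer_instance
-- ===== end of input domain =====

-- B replaces A's O(N log N) multiples sieve for sigma/tau by one multiplicative O(N) pass over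
-- the smallest-prime-factor sieve (objective: faster; measured faster in a timing run).

-- ===== PORT A =====
-- tau/sigma divisor sieve: 'for d: for multiple in range(d, N+1, d): tau[m] += 1; sigma[m] += d'
-- state is (tau, sigma)
def pvA_tausig (N : Int) : List Int × List Int :=
  (PySem.List.pyRange 1 (N + 1) 1).foldl
    (fun ts d =>
      (PySem.List.pyRange d (N + 1) d).foldl
        (fun ts m =>
          (PySem.List.pySetD ts.1 m (PySem.List.pyGetD ts.1 m 0 + 1),
           PySem.List.pySetD ts.2 m (PySem.List.pyGetD ts.2 m 0 + d))) ts)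
    (List.replicate (N + 1).toNat 0, List.replicate (N + 1).toNat 0)

-- smallest-prime-factor sieve; 'int(N**0.5)' is ported as Nat.sqrt, exact for 0 ≤ N ≤ 2^31
def pvA_spf (N : Int) : List Int :=
  (PySem.List.pyRange 2 ((Nat.sqrt N.toNat : Int) + 1) 1).foldl
    (fun spf i =>
      if PySem.List.pyGetD spf i 0 = i then
        (PySem.List.pyRange (i * i) (N + 1) i).foldl
          (fun spf j =>
            if PySem.List.pyGetD spf j 0 = j then PySem.List.pySetD spf j i else spf) spf
      else spf)
    (PySem.List.pyRange 0 (N + 1) 1)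

-- 'phi[0] = 0; phi[1] = 1; for n in range(2, N+1): …' on phi initialised to list(range(N+1))
def pvA_phi (N : Int) (spf : List Int) : List Int :=
  (PySem.List.pyRange 2 (N + 1) 1).foldl
    (fun phi n =>
      if PySem.List.pyGetD spf n 0 = n then
        PySem.List.pySetD phi n (n - 1)
      else
        let p := PySem.List.pyGetD spf n 0
        let m := PySem.Int.floordiv n p
        if PySem.Int.mod m p = 0 then
          PySem.List.pySetD phi n (PySem.List.pyGetD phi m 0 * p)
        else
          PySem.List.pySetD phi n (PySem.List.pyGetD phi m 0 * (p - 1)))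
    (PySem.List.pySetD (PySem.List.pySetD (PySem.List.pyRange 0 (N + 1) 1) 0 0) 1 1)

def compute_arithmetic_functions (N : Int) : List Int × List Int × List Int :=
  let ts := pvA_tausig N
  (ts.2, pvA_phi N (pvA_spf N), ts.1)

-- ===== PORT B =====
-- same spf sieve, but without the sqrt bound (empty inner ranges stop large i anyway)
def pvB_spf (N : Int) : List Int :=
  (PySem.List.pyRange 2 (N + 1) 1).foldl
    (fun spf i =>
      if PySem.List.pyGetD spf i 0 = i then
        (PySem.List.pyRange (i * i) (N + 1) i).foldl
          (fun spf j =>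
            if PySem.List.pyGetD spf j 0 = j then PySem.List.pySetD spf j i else spf) spf
      else spf)
    (PySem.List.pyRange 0 (N + 1) 1)

-- one pass: sigma, phi, tau, pp grown by append; state is (sigma, phi, tau, pp)
def pvB_main (N : Int) (spf : List Int) : List Int × List Int × List Int × List Int :=
  (PySem.List.pyRange 0 (N + 1) 1).foldl
    (fun st n =>
      if n = 0 then (st.1 ++ [0], st.2.1 ++ [0], st.2.2.1 ++ [0], st.2.2.2 ++ [0])
      else if n = 1 then (st.1 ++ [1], st.2.1 ++ [1], st.2.2.1 ++ [1], st.2.2.2 ++ [1])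
      else
        let p := PySem.List.pyGetD spf n 0
        let m := PySem.Int.floordiv n p
        let q := if PySem.Int.mod m p = 0 then PySem.List.pyGetD st.2.2.2 m 0 * p else p
        if q = n then  -- n = p^e is a prime power, m = p^(e-1)
          (st.1 ++ [PySem.List.pyGetD st.1 m 0 + n],
           st.2.1 ++ [n - m],
           st.2.2.1 ++ [PySem.List.pyGetD st.2.2.1 m 0 + 1],
           st.2.2.2 ++ [q])
        else  -- n = q * r with r = n // q coprime to q
          let r := PySem.Int.floordiv n q
          (st.1 ++ [PySem.List.pyGetD st.1 r 0 * PySem.List.pyGetD st.1 q 0],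
           st.2.1 ++ [PySem.List.pyGetD st.2.1 r 0 * PySem.List.pyGetD st.2.1 q 0],
           st.2.2.1 ++ [PySem.List.pyGetD st.2.2.1 r 0 * PySem.List.pyGetD st.2.2.1 q 0],
           st.2.2.2 ++ [q]))
    ([], [], [], [])

def compute_arithmetic_functions_alt (N : Int) : List Int × List Int × List Int :=
  let st := pvB_main N (pvB_spf N)
  (st.1, st.2.1, st.2.2.1)

-- ===== PRECONDITION & SPEC =====
-- Pre_ excludes exactly N ≤ 0, on which A raises (TypeError for N < 0, IndexError at N = 0)
def Pre_compute_arithmetic_functions (N : Int) : Prop := 1 ≤ N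
instance (N : Int) : Decidable (Pre_compute_arithmetic_functions N) := by
  unfold Pre_compute_arithmetic_functions; infer_instance

def pvWitness_compute_arithmetic_functions : Int := 3

-- For N ≤ 0 A raises (TypeError from int(N**0.5) on N < 0, IndexError from phi[1] = 1 at N = 0)
-- while B returns the sieves over the empty/one-element range.
def Raises_compute_arithmetic_functions (N : Int) : Prop := N ≤ 0
instance (N : Int) : Decidable (Raises_compute_arithmetic_functions N) := by
  unfold Raises_compute_arithmetic_functions; infer_instance

def pvRaiseWitness_compute_arithmetic_functions : Int := 0
def pvRaiseWitnessOut_compute_arithmetic_functions : List Int × List Int × List Int :=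
  ([0], [0], [0])

def Spec_compute_arithmetic_functions (N : Int) (out : List Int × List Int × List Int) : Prop :=
  out = compute_arithmetic_functions_alt N
instance (N : Int) (out : List Int × List Int × List Int) :
    Decidable (Spec_compute_arithmetic_functions N out) := by
  unfold Spec_compute_arithmetic_functions; infer_instance

-- ===== CLAIM (what is proved, stated in full; the proofs are below) =====
def Claim_equal_compute_arithmetic_functions : Prop :=
  ∀ (N : Int), Dom_compute_arithmetic_functions N → Pre_compute_arithmetic_functions N →
    Spec_compute_arithmetic_functions N (compute_arithmetic_functions N)

def Claim_raises_compute_arithmetic_functions : Prop :=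
  (∀ (N : Int), Dom_compute_arithmetic_functions N → Raises_compute_arithmetic_functions N →
    ¬ Pre_compute_arithmetic_functions N) ∧
  (Dom_compute_arithmetic_functions (pvRaiseWitness_compute_arithmetic_functions) ∧
   Raises_compute_arithmetic_functions (pvRaiseWitness_compute_arithmetic_functions) ∧
   compute_arithmetic_functions_alt (pvRaiseWitness_compute_arithmetic_functions) =
     pvRaiseWitnessOut_compute_arithmetic_functions)

-- ===== LEMMAS AND PROOFS =====

theorem pv_pyRange_pos_nil {a b s : Int} (hs : 0 < s) (h : b ≤ a) :
    PySem.List.pyRange a b s = [] := by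
  rw [PySem.List.pyRange_of_pos a b hs, if_neg (by omega)]
  simp

theorem pv_foldl_id {α β : Type} (step : α → β → α) (l : List β)
    (h : ∀ acc x, x ∈ l → step acc x = acc) (acc : α) : l.foldl step acc = acc := by
  induction l generalizing acc with
  | nil => rfl
  | cons x xs ih =>
    rw [List.foldl_cons, h acc x (by simp)]
    exact ih (fun a y hy => h a y (by simp [hy])) acc

theorem pv_spf_eq (N : Int) (hN : 1 ≤ N) : pvA_spf N = pvB_spf N := by
  unfold pvA_spf pvB_spf
  have hs1 : 1 ≤ Nat.sqrt N.toNat := by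
    exact Nat.sqrt_pos.mpr (by omega)
  have hsN : (Nat.sqrt N.toNat : Int) ≤ N := by
    have := Nat.sqrt_le_self N.toNat
    omega
  rw [PySem.List.pyRange_one_append 2 ((Nat.sqrt N.toNat : Int) + 1) (N + 1)
    (by omega) (by omega), List.foldl_append]
  refine (pv_foldl_id _ _ ?_ _).symm
  intro acc i hi
  rw [PySem.List.mem_pyRange_one] at hi
  have hii : N + 1 ≤ i * i := by
    have h1 : N < ((Nat.sqrt N.toNat : Int) + 1) * ((Nat.sqrt N.toNat : Int) + 1) := by
      have h0 := Nat.lt_succ_sqrt N.toNat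
      have hNt : ((N.toNat : Int)) = N := Int.toNat_of_nonneg (by omega)
      have : (N.toNat : Int) < ((Nat.sqrt N.toNat : Int) + 1) * ((Nat.sqrt N.toNat : Int) + 1) := by
        exact_mod_cast h0
      omega
    have h2 : ((Nat.sqrt N.toNat : Int) + 1) * ((Nat.sqrt N.toNat : Int) + 1) ≤ i * i := by
      have h3 : (0:Int) ≤ (Nat.sqrt N.toNat : Int) + 1 := by positivity
      exact mul_le_mul hi.1 hi.1 h3 (by omega)
    omega
  rw [pv_pyRange_pos_nil (by omega) hii]
  split <;> rfl

theorem pv_getD_elem {l : List Int} {j : Nat} (h : j < l.length) : l.getD j 0 = l[j] := by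
  simp [List.getD_eq_getElem?_getD, List.getElem?_eq_getElem h]

def pvPhiA (spf phi : List Int) (n : Int) : List Int :=
  if PySem.List.pyGetD spf n 0 = n then
    PySem.List.pySetD phi n (n - 1)
  else
    let p := PySem.List.pyGetD spf n 0
    let m := PySem.Int.floordiv n p
    if PySem.Int.mod m p = 0 then
      PySem.List.pySetD phi n (PySem.List.pyGetD phi m 0 * p)
    else
      PySem.List.pySetD phi n (PySem.List.pyGetD phi m 0 * (p - 1))

def pvPhiInitA (N : Int) : List Int :=
  PySem.List.pySetD (PySem.List.pySetD (PySem.List.pyRange 0 (N + 1) 1) 0 0) 1 1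

theorem pvA_phi_eq_foldl (N : Int) (spf : List Int) :
    pvA_phi N spf = (PySem.List.pyRange 2 (N + 1) 1).foldl (pvPhiA spf) (pvPhiInitA N) := rfl

theorem pv_nodup_pyRange_pos {a b s : Int} (hs : 0 < s) : (PySem.List.pyRange a b s).Nodup := by
  rw [PySem.List.pyRange_of_pos a b hs]
  exact List.Nodup.map (fun x y h => by simp at h; omega) (List.nodup_range)



theorem pv_foldl_bump_len (δ : Int) (ms : List Int) (hnn : ∀ m ∈ ms, 0 ≤ m) (l : List Int) :
    ((ms.foldl (fun l m => PySem.List.pySetD l m (PySem.List.pyGetD l m 0 + δ)) l)).length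
      = l.length := by
  induction ms generalizing l with
  | nil => rfl
  | cons m ms ih =>
    rw [List.foldl_cons, ih (fun x hx => hnn x (by simp [hx]))]
    rw [PySem.List.pySetD_of_nonneg _ _ (hnn m (by simp)), List.length_set]

theorem pv_foldl_bump (δ : Int) (ms : List Int) (hnn : ∀ m ∈ ms, 0 ≤ m) (hnd : ms.Nodup)
    (l : List Int) (j : Nat) :
    ((ms.foldl (fun l m => PySem.List.pySetD l m (PySem.List.pyGetD l m 0 + δ)) l)).getD j 0
      = l.getD j 0 + (if ((j : Int) ∈ ms ∧ j < l.length) then δ else 0) := by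
  induction ms generalizing l with
  | nil => simp
  | cons m ms ih =>
    have hm0 : 0 ≤ m := hnn m (by simp)
    rw [List.foldl_cons, ih (fun x hx => hnn x (by simp [hx])) (List.nodup_cons.mp hnd).2]
    rw [PySem.List.pySetD_of_nonneg _ _ hm0, PySem.List.pyGetD_of_nonneg _ _ hm0]
    by_cases hjm : (j : Int) = m
    · have hjt : m.toNat = j := by omega
      have hnm : (j : Int) ∉ ms := by rw [hjm]; exact (List.nodup_cons.mp hnd).1
      by_cases hlt : j < l.length
      · rw [List.getD_eq_getElem?_getD, hjt, List.getElem?_set_self (by omega),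
          if_neg (by simp [hnm]), if_pos (by exact ⟨by simp [hjm], hlt⟩)]
        simp [List.getD_eq_getElem?_getD]
      · rw [hjt, List.set_eq_of_length_le (by omega), if_neg (by simp [hnm]),
          if_neg (by intro h; exact hlt h.2)]
    · have hne : m.toNat ≠ j := by omega
      rw [List.getD_eq_getElem?_getD, List.getElem?_set_ne hne, ← List.getD_eq_getElem?_getD]
      simp only [List.length_set]
      congr 1
      by_cases hj : (j : Int) ∈ ms <;> by_cases hl : j < l.length <;>
        simp [hj, hl, hjm, List.mem_cons]

theorem pv_mem_pyRange_nonneg {N d x : Int} (hd : 0 < d)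
    (hx : x ∈ PySem.List.pyRange d (N + 1) d) : 0 ≤ x := by
  have := (PySem.List.mem_pyRange_iff_of_pos hd x).mp hx
  omega

theorem pv_tausig_outer_len (N : Int) (g : Int → Int) (ds : List Int) (hds : ∀ d ∈ ds, 0 < d)
    (l : List Int) :
    ((ds.foldl (fun l d => (PySem.List.pyRange d (N + 1) d).foldl
        (fun l m => PySem.List.pySetD l m (PySem.List.pyGetD l m 0 + g d)) l) l)).length
      = l.length := by
  induction ds generalizing l with
  | nil => rfl
  | cons d ds ih =>
    have hd := hds d (by simp)
    rw [List.foldl_cons, ih (fun x hx => hds x (by simp [hx]))]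
    exact pv_foldl_bump_len _ _ (fun m hm => pv_mem_pyRange_nonneg hd hm) l

theorem pv_tausig_outer (N : Int) (g : Int → Int) (ds : List Int) (hds : ∀ d ∈ ds, 0 < d)
    (l : List Int) (j : Nat) :
    ((ds.foldl (fun l d => (PySem.List.pyRange d (N + 1) d).foldl
        (fun l m => PySem.List.pySetD l m (PySem.List.pyGetD l m 0 + g d)) l) l)).getD j 0
      = l.getD j 0 + ((ds.map (fun d =>
          if ((j : Int) ∈ PySem.List.pyRange d (N + 1) d ∧ j < l.length) then g d else 0)).sum) := by
  induction ds generalizing l with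
  | nil => simp
  | cons d ds ih =>
    have hd := hds d (by simp)
    rw [List.foldl_cons, ih (fun x hx => hds x (by simp [hx]))]
    rw [pv_foldl_bump (g d) _ (fun m hm => pv_mem_pyRange_nonneg hd hm)
      (pv_nodup_pyRange_pos hd) l j]
    rw [pv_foldl_bump_len (g d) _ (fun m hm => pv_mem_pyRange_nonneg hd hm) l]
    simp only [List.map_cons, List.sum_cons]
    ring

theorem pv_bridge (N : Int) (g : Int → Int) (j : Nat) (hj : j < (N + 1).toNat) :
    ((PySem.List.pyRange 1 (N + 1) 1).map (fun d =>
        if ((j : Int) ∈ PySem.List.pyRange d (N + 1) d ∧ j < (N + 1).toNat)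
        then g d else 0)).sum
      = ((PySem.List.pyRange 1 ((j : Int) + 1) 1).map (fun d =>
          if PySem.Int.mod (j : Int) d = 0 then g d else 0)).sum := by
  rw [PySem.List.pyRange_one_append 1 ((j : Int) + 1) (N + 1) (by omega) (by omega),
    List.map_append, List.sum_append]
  have htail : ((PySem.List.pyRange ((j : Int) + 1) (N + 1) 1).map (fun d =>
      if ((j : Int) ∈ PySem.List.pyRange d (N + 1) d ∧ j < (N + 1).toNat)
      then g d else 0)).sum = 0 := by
    refine List.sum_eq_zero (fun x hx => ?_)
    obtain ⟨d, hd, rfl⟩ := List.mem_map.mp hx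
    rw [PySem.List.mem_pyRange_one] at hd
    rw [if_neg]
    intro ⟨hmem, _⟩
    have := (PySem.List.mem_pyRange_iff_of_pos (by omega) ((j : Int))).mp hmem
    omega
  rw [htail, add_zero]
  refine congrArg _ (List.map_congr_left (fun d hd => ?_))
  rw [PySem.List.mem_pyRange_one] at hd
  refine if_congr ?_ rfl rfl
  rw [PySem.List.mem_pyRange_iff_of_pos (by omega), PySem.Int.mod_eq_zero_iff_dvd]
  constructor
  · intro ⟨⟨_, _, hdvd⟩, _⟩
    have : d ∣ (j : Int) - d + d := Dvd.dvd.add hdvd (dvd_refl d)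
    simpa using this
  · intro hdvd
    exact ⟨⟨by omega, by omega, by exact dvd_sub hdvd (dvd_refl d)⟩, hj⟩

def pvQnat (j : Nat) : Nat := if j ≤ 1 then j else j.minFac ^ (j.factorization j.minFac)

-- minFac of j / minFac j when minFac j still divides
theorem pv_minFac_div {j : Nat} (hj : 2 ≤ j) (hd : j.minFac ∣ j / j.minFac) :
    (j / j.minFac).minFac = j.minFac := by
  have hp : j.minFac.Prime := Nat.minFac_prime (by omega)
  have hm2 : 2 ≤ j / j.minFac := le_trans hp.two_le
    (Nat.le_of_dvd (Nat.div_pos (Nat.minFac_le (by omega)) (Nat.minFac_pos j)) hd)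
  have h1 : (j / j.minFac).minFac ≤ j.minFac := Nat.minFac_le_of_dvd hp.two_le hd
  have h2 : j.minFac ≤ (j / j.minFac).minFac := by
    refine Nat.minFac_le_of_dvd (Nat.minFac_prime (by omega)).two_le ?_
    exact dvd_trans (Nat.minFac_dvd _) (Nat.div_dvd_of_dvd (Nat.minFac_dvd j))
  omega

theorem pv_vp_pos {j : Nat} (hj : 2 ≤ j) : 1 ≤ j.factorization j.minFac := by
  have hp : j.minFac.Prime := Nat.minFac_prime (by omega)
  exact (Nat.Prime.factorization_pos_of_dvd hp (by omega) (Nat.minFac_dvd j))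

-- j = minFac j * (j / minFac j), and the factorization recursion
theorem pv_fact_div {j : Nat} (hj : 2 ≤ j) :
    j.factorization j.minFac = (j / j.minFac).factorization j.minFac + 1 := by
  have hp : j.minFac.Prime := Nat.minFac_prime (by omega)
  have hej : j = j.minFac * (j / j.minFac) := (Nat.mul_div_cancel' (Nat.minFac_dvd j)).symm
  have hm0 : j / j.minFac ≠ 0 := by
    intro h; rw [h, Nat.mul_zero] at hej; omega
  calc j.factorization j.minFac
      = (j.minFac * (j / j.minFac)).factorization j.minFac := by rw [← hej]
    _ = (j.minFac.factorization + (j / j.minFac).factorization) j.minFac := by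
        rw [Nat.factorization_mul hp.ne_zero hm0]
    _ = (j / j.minFac).factorization j.minFac + 1 := by
        simp [hp.factorization_self]; ring

-- Q-recursion, case p ∣ m
theorem pv_Q_mul {j : Nat} (hj : 2 ≤ j) (hd : j.minFac ∣ j / j.minFac) :
    pvQnat j = pvQnat (j / j.minFac) * j.minFac := by
  have hp : j.minFac.Prime := Nat.minFac_prime (by omega)
  have hm2 : 2 ≤ j / j.minFac := le_trans hp.two_le
    (Nat.le_of_dvd (Nat.div_pos (Nat.minFac_le (by omega)) (Nat.minFac_pos j)) hd)
  unfold pvQnat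
  rw [if_neg (by omega), if_neg (by omega), pv_minFac_div hj hd, pv_fact_div hj, pow_succ]

-- Q-recursion, case p ∤ m
theorem pv_Q_prime {j : Nat} (hj : 2 ≤ j) (hd : ¬ j.minFac ∣ j / j.minFac) :
    pvQnat j = j.minFac := by
  have hp : j.minFac.Prime := Nat.minFac_prime (by omega)
  have hv : j.factorization j.minFac = 1 := by
    have h1 := pv_fact_div hj
    have h2 : (j / j.minFac).factorization j.minFac = 0 := by
      rcases Nat.eq_zero_or_pos (j / j.minFac) with h | h
      · rw [h]; simp
      · exact Nat.factorization_eq_zero_of_not_dvd hd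
    omega
  unfold pvQnat
  rw [if_neg (by omega), hv, pow_one]

-- prime powers in the abstract
theorem pv_ppow_div {p e : Nat} (hp : p.Prime) (he : 1 ≤ e) : p ^ e / p = p ^ (e - 1) := by
  rw [show e = (e - 1) + 1 by omega, pow_succ]
  exact Nat.mul_div_cancel _ hp.pos

theorem pv_ppow_sigma {p e : Nat} (hp : p.Prime) (he : 1 ≤ e) (k : Nat) :
    (ArithmeticFunction.sigma k) (p ^ e)
      = (ArithmeticFunction.sigma k) (p ^ (e - 1)) + (p ^ e) ^ k := by
  rw [ArithmeticFunction.sigma_apply, ArithmeticFunction.sigma_apply,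
    Nat.sum_divisors_prime_pow hp, Nat.sum_divisors_prime_pow hp,
    show e - 1 + 1 = e by omega]
  conv_lhs => rw [show e + 1 = e + 1 by rfl]
  rw [Finset.sum_range_succ]

theorem pv_ppow_phi {p e : Nat} (hp : p.Prime) (he : 1 ≤ e) :
    (p ^ e).totient = p ^ e - p ^ (e - 1) := by
  rw [Nat.totient_prime_pow hp (by omega), Nat.mul_sub, Nat.mul_one, ← pow_succ,
    show e - 1 + 1 = e by omega]

-- the prime-power case of the B recursion: pvQnat j = j means j = p^e, m = j/p = p^(e-1)
theorem pv_pp_eq {j : Nat} (hj : 2 ≤ j) (hq : pvQnat j = j) :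
    j = j.minFac ^ (j.factorization j.minFac) := by
  unfold pvQnat at hq
  rw [if_neg (by omega)] at hq
  omega

theorem pv_pp_div {j : Nat} (hj : 2 ≤ j) (hq : pvQnat j = j) :
    j / j.minFac = j.minFac ^ (j.factorization j.minFac - 1) := by
  have hp : j.minFac.Prime := Nat.minFac_prime (by omega)
  have hv := pv_vp_pos hj
  set p := j.minFac with hp0
  set e := j.factorization j.minFac with he0
  have hpe : j = p ^ e := pv_pp_eq hj hq
  rw [hpe, pv_ppow_div hp hv]

theorem pv_pp_sigma {j : Nat} (hj : 2 ≤ j) (hq : pvQnat j = j) (k : Nat) :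
    (ArithmeticFunction.sigma k) j = (ArithmeticFunction.sigma k) (j / j.minFac) + j ^ k := by
  have hp : j.minFac.Prime := Nat.minFac_prime (by omega)
  have hv := pv_vp_pos hj
  rw [pv_pp_div hj hq]
  set p := j.minFac with hp0
  set e := j.factorization j.minFac with he0
  have hpe : j = p ^ e := pv_pp_eq hj hq
  rw [hpe, pv_ppow_sigma hp hv]

theorem pv_pp_phi {j : Nat} (hj : 2 ≤ j) (hq : pvQnat j = j) :
    j.totient = j - j / j.minFac := by
  have hp : j.minFac.Prime := Nat.minFac_prime (by omega)
  have hv := pv_vp_pos hj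
  rw [pv_pp_div hj hq]
  set p := j.minFac with hp0
  set e := j.factorization j.minFac with he0
  have hpe : j = p ^ e := pv_pp_eq hj hq
  rw [hpe, pv_ppow_phi hp hv]

-- split case: q = pvQnat j a prime-power factor, r = j / q coprime to it
theorem pv_Q_dvd {j : Nat} (hj : 2 ≤ j) : pvQnat j ∣ j := by
  unfold pvQnat
  rw [if_neg (by omega)]
  exact Nat.ordProj_dvd j j.minFac

theorem pv_Q_two_le {j : Nat} (hj : 2 ≤ j) : 2 ≤ pvQnat j := by
  have hp : j.minFac.Prime := Nat.minFac_prime (by omega)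
  have hv := pv_vp_pos hj
  unfold pvQnat
  rw [if_neg (by omega)]
  calc 2 ≤ j.minFac := hp.two_le
    _ = j.minFac ^ 1 := (pow_one _).symm
    _ ≤ j.minFac ^ (j.factorization j.minFac) :=
        Nat.pow_le_pow_right hp.one_lt.le hv

theorem pv_Q_mul_r {j : Nat} (hj : 2 ≤ j) : pvQnat j * (j / pvQnat j) = j :=
  Nat.mul_div_cancel' (pv_Q_dvd hj)

theorem pv_Q_coprime {j : Nat} (hj : 2 ≤ j) : Nat.Coprime (pvQnat j) (j / pvQnat j) := by
  have hp : j.minFac.Prime := Nat.minFac_prime (by omega)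
  unfold pvQnat
  rw [if_neg (by omega)]
  exact Nat.Coprime.pow_left _ (Nat.coprime_ordCompl hp (by omega))

theorem pv_split_sigma {j : Nat} (hj : 2 ≤ j) (k : Nat) :
    (ArithmeticFunction.sigma k) j
      = (ArithmeticFunction.sigma k) (j / pvQnat j) * (ArithmeticFunction.sigma k) (pvQnat j) := by
  conv_lhs => rw [← pv_Q_mul_r hj]
  rw [ArithmeticFunction.isMultiplicative_sigma.map_mul_of_coprime (pv_Q_coprime hj)]
  ring

theorem pv_split_phi {j : Nat} (hj : 2 ≤ j) :
    j.totient = (j / pvQnat j).totient * (pvQnat j).totient := by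
  conv_lhs => rw [← pv_Q_mul_r hj]
  rw [Nat.totient_mul (pv_Q_coprime hj)]
  ring

-- phi recursion used by program A
theorem pv_phi_mul_p {j : Nat} (hj : 2 ≤ j) (hd : j.minFac ∣ j / j.minFac) :
    j.totient = (j / j.minFac).totient * j.minFac := by
  have hp : j.minFac.Prime := Nat.minFac_prime (by omega)
  conv_lhs => rw [← Nat.mul_div_cancel' (Nat.minFac_dvd j)]
  rw [Nat.totient_mul_of_prime_of_dvd hp hd]
  ring

theorem pv_phi_mul_p1 {j : Nat} (hj : 2 ≤ j) (hd : ¬ j.minFac ∣ j / j.minFac) :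
    j.totient = (j / j.minFac).totient * (j.minFac - 1) := by
  have hp : j.minFac.Prime := Nat.minFac_prime (by omega)
  conv_lhs => rw [← Nat.mul_div_cancel' (Nat.minFac_dvd j)]
  rw [Nat.totient_mul ((hp.coprime_iff_not_dvd).mpr hd), Nat.totient_prime hp]
  ring

theorem pv_listsum (j : Nat) (g : Int → Int) :
    ((PySem.List.pyRange 1 ((j : Int) + 1) 1).map
      (fun d => if PySem.Int.mod (j : Int) d = 0 then g d else 0)).sum
    = ∑ d ∈ j.divisors, g (d : Int) := by
  rw [PySem.List.pyRange_one, List.map_map,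
    show ((j : Int) + 1 - 1) = (j : Int) by ring, Int.toNat_natCast]
  have hbr : ((List.range j).map ((fun d => if PySem.Int.mod (j : Int) d = 0 then g d else 0)
      ∘ (fun k : Nat => (1 : Int) + k))).sum
      = ∑ k ∈ Finset.range j, (if PySem.Int.mod (j : Int) (1 + (k : Int)) = 0
          then g (1 + (k : Int)) else 0) := rfl
  rw [hbr]
  have h1 : ∀ k : Nat, (1 : Int) + (k : Int) = ((1 + k : Nat) : Int) := by
    intro k; push_cast; ring
  calc ∑ k ∈ Finset.range j, (if PySem.Int.mod (j : Int) (1 + (k : Int)) = 0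
          then g (1 + (k : Int)) else 0)
      = ∑ k ∈ Finset.range j, (if PySem.Int.mod (j : Int) ((1 + k : Nat) : Int) = 0
          then g ((1 + k : Nat) : Int) else 0) := by
        refine Finset.sum_congr rfl (fun k _ => ?_)
        rw [h1]
    _ = ∑ d ∈ Finset.Ico 1 (j + 1), (if PySem.Int.mod (j : Int) (d : Int) = 0
          then g (d : Int) else 0) := by
        rw [Finset.sum_Ico_eq_sum_range]
        simp
    _ = ∑ d ∈ Finset.Ico 1 (j + 1), (if d ∣ j then g (d : Int) else 0) := by
        refine Finset.sum_congr rfl (fun d _ => ?_)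
        refine if_congr ?_ rfl rfl
        rw [PySem.Int.mod_eq_zero_iff_dvd, Int.natCast_dvd_natCast]
    _ = ∑ d ∈ j.divisors, g (d : Int) := by
        rw [← Finset.sum_filter]
        rfl

theorem pv_listsum_sigma (j : Nat) :
    ((PySem.List.pyRange 1 ((j : Int) + 1) 1).map
      (fun d => if PySem.Int.mod (j : Int) d = 0 then d else 0)).sum
    = ((ArithmeticFunction.sigma 1) j : Int) := by
  rw [pv_listsum j (fun d => d), ArithmeticFunction.sigma_one_apply, Nat.cast_sum]

theorem pv_listsum_tau (j : Nat) :
    ((PySem.List.pyRange 1 ((j : Int) + 1) 1).map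
      (fun d => if PySem.Int.mod (j : Int) d = 0 then (1 : Int) else 0)).sum
    = ((ArithmeticFunction.sigma 0) j : Int) := by
  rw [pv_listsum j (fun _ => (1 : Int)), ArithmeticFunction.sigma_zero_apply,
    Finset.sum_const]
  simp

theorem pv_condwrite_len (v : Int) (ms : List Int) (hpos : ∀ m ∈ ms, 0 < m) (l : List Int) :
    ((ms.foldl (fun l m => if PySem.List.pyGetD l m 0 = m then PySem.List.pySetD l m v else l)
      l)).length = l.length := by
  induction ms generalizing l with
  | nil => rfl
  | cons m ms ih =>
    rw [List.foldl_cons, ih (fun x hx => hpos x (by simp [hx]))]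
    split
    · rw [PySem.List.pySetD_of_nonneg _ _ (le_of_lt (hpos m (by simp))), List.length_set]
    · rfl

theorem pv_condwrite (v : Int) (ms : List Int) (hpos : ∀ m ∈ ms, 0 < m) (hnd : ms.Nodup)
    (l : List Int) (j : Nat) :
    ((ms.foldl (fun l m => if PySem.List.pyGetD l m 0 = m then PySem.List.pySetD l m v else l)
      l)).getD j 0
      = if ((j : Int) ∈ ms ∧ j < l.length ∧ l.getD j 0 = (j : Int)) then v else l.getD j 0 := by
  induction ms generalizing l with
  | nil => simp
  | cons m ms ih =>
    have hm0 : 0 < m := hpos m (by simp)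
    rw [List.foldl_cons, ih (fun x hx => hpos x (by simp [hx])) (List.nodup_cons.mp hnd).2]
    have hread : PySem.List.pyGetD l m 0 = l.getD m.toNat 0 :=
      PySem.List.pyGetD_of_nonneg _ _ (by omega)
    by_cases hjm : (j : Int) = m
    · have hjt : m.toNat = j := by omega
      have hnm : (j : Int) ∉ ms := by rw [hjm]; exact (List.nodup_cons.mp hnd).1
      by_cases hc : PySem.List.pyGetD l m 0 = m
      · -- the entry is written
        rw [if_pos hc, PySem.List.pySetD_of_nonneg _ _ (by omega), hjt]
        have hgd : l.getD j 0 = (j : Int) := by rw [← hjt, ← hread, hc]; omega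
        have hlt : j < l.length := by
          by_contra h
          rw [List.getD_eq_getElem?_getD, List.getElem?_eq_none (by omega)] at hgd
          simp at hgd; omega
        rw [if_neg (by intro h; exact hnm h.1), if_pos ⟨by simp [hjm], hlt, hgd⟩]
        rw [List.getD_eq_getElem?_getD, List.getElem?_set_self (by omega)]
        rfl
      · rw [if_neg hc]
        have hgd : ¬ l.getD j 0 = (j : Int) := by rw [← hjt, ← hread]; rw [← hjm] at hc ⊢; exact hc
        rw [if_neg (by intro h; exact hnm h.1), if_neg (by intro h; exact hgd h.2.2)]
    · have hne : m.toNat ≠ j := by omega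
      have hstep : ∀ l' : List Int,
          ((if PySem.List.pyGetD l m 0 = m then PySem.List.pySetD l m v else l)) = l' →
          l'.getD j 0 = l.getD j 0 ∧ l'.length = l.length := by
        intro l' hl'
        subst hl'
        split
        · rw [PySem.List.pySetD_of_nonneg _ _ (by omega), List.length_set,
            List.getD_eq_getElem?_getD, List.getElem?_set_ne hne, ← List.getD_eq_getElem?_getD]
          exact ⟨rfl, rfl⟩
        · exact ⟨rfl, rfl⟩
      obtain ⟨hg, hl⟩ := hstep _ rfl
      rw [hg, hl]
      refine if_congr ?_ rfl rfl
      simp only [List.mem_cons]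
      constructor
      · rintro ⟨h1, h2⟩
        exact ⟨Or.inr h1, h2⟩
      · rintro ⟨h1 | h1, h2⟩
        · exact absurd h1 hjm
        · exact ⟨h1, h2⟩

-- after the outer loop has processed i ∈ [2, c): composite entries with minFac < c are marked
def pvSieveSpec (N c : Int) (l : List Int) : Prop :=
  l.length = (N + 1).toNat ∧ ∀ j : Nat, j < (N + 1).toNat →
    l.getD j 0 = (if 2 ≤ j ∧ ¬ j.Prime ∧ ((j.minFac : Int)) < c
                  then (j.minFac : Int) else (j : Int))

theorem pv_minFac_lt_of_comp {j : Nat} (h2 : 2 ≤ j) (hnp : ¬ j.Prime) : j.minFac < j := by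
  have hle : j.minFac ≤ j := Nat.minFac_le (by omega)
  rcases Nat.lt_or_eq_of_le hle with h | h
  · exact h
  · exact absurd (Nat.prime_def_minFac.mpr ⟨h2, h⟩) hnp

theorem pv_sieve_step (N c : Int) (hN : 1 ≤ N) (hc2 : 2 ≤ c) (hcN : c ≤ N) (l : List Int)
    (h : pvSieveSpec N c l) :
    pvSieveSpec N (c + 1)
      (if PySem.List.pyGetD l c 0 = c then
        (PySem.List.pyRange (c * c) (N + 1) c).foldl
          (fun spf j =>
            if PySem.List.pyGetD spf j 0 = j then PySem.List.pySetD spf j c else spf) l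
      else l) := by
  obtain ⟨hlen, hspec⟩ := h
  have hcsz : c.toNat < (N + 1).toNat := by omega
  have hct : ((c.toNat : Int)) = c := by omega
  have hvalc := hspec c.toNat hcsz
  have hread : PySem.List.pyGetD l c 0 = l.getD c.toNat 0 :=
    PySem.List.pyGetD_of_nonneg _ _ (by omega)
  by_cases hprime : c.toNat.Prime
  · -- c is prime: the inner loop marks every unmarked multiple j ≥ c²
    rw [if_pos (by
      rw [hread, hvalc, if_neg (by intro hh; exact hh.2.1 hprime)]; omega)]
    have hpos : ∀ m ∈ PySem.List.pyRange (c * c) (N + 1) c, 0 < m := by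
      intro m hm
      have := (PySem.List.mem_pyRange_iff_of_pos (by omega) m).mp hm
      nlinarith [this.1]
    constructor
    · rw [pv_condwrite_len _ _ hpos, hlen]
    · intro j hj
      rw [pv_condwrite _ _ hpos (pv_nodup_pyRange_pos (by omega)) l j, hlen]
      have hcc : ((c.toNat * c.toNat : Nat) : Int) = c * c := by push_cast; rw [hct]
      have hmem : ((j : Int) ∈ PySem.List.pyRange (c * c) (N + 1) c)
          ↔ (c.toNat * c.toNat ≤ j ∧ c.toNat ∣ j) := by
        rw [PySem.List.mem_pyRange_iff_of_pos (by omega)]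
        constructor
        · rintro ⟨h1, h2, h3⟩
          have hdj : c ∣ (j : Int) := by
            have : c ∣ (j : Int) - c * c + c * c := Dvd.dvd.add h3 (Dvd.intro c rfl)
            simpa using this
          rw [← hct] at hdj h1
          exact ⟨by exact_mod_cast h1, by exact_mod_cast hdj⟩
        · rintro ⟨h1, h2⟩
          refine ⟨by rw [← hcc]; exact_mod_cast h1, by omega, ?_⟩
          refine dvd_sub ?_ (Dvd.intro c rfl)
          rw [← hct]
          exact_mod_cast h2
      by_cases h2j : 2 ≤ j
      swap
      · -- j < 2 is never touched
        have hnw : ¬ ((j : Int) ∈ PySem.List.pyRange (c * c) (N + 1) c ∧ j < (N + 1).toNat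
            ∧ l.getD j 0 = (j : Int)) := by
          intro hh
          have := (hmem.mp hh.1).1
          nlinarith
        rw [if_neg hnw, hspec j hj, if_neg (by intro hh; omega), if_neg (by intro hh; omega)]
      by_cases hpj : j.Prime
      · -- primes are never touched
        have hnw : ¬ ((j : Int) ∈ PySem.List.pyRange (c * c) (N + 1) c ∧ j < (N + 1).toNat
            ∧ l.getD j 0 = (j : Int)) := by
          intro hh
          obtain ⟨hge, hdvd⟩ := hmem.mp hh.1
          have : c.toNat = 1 ∨ c.toNat = j := (Nat.Prime.eq_one_or_self_of_dvd hpj _ hdvd).imp id id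
          rcases this with h1 | h1
          · omega
          · nlinarith
        rw [if_neg hnw, hspec j hj, if_neg (by intro hh; exact hh.2.1 hpj),
          if_neg (by intro hh; exact hh.2.1 hpj)]
      · -- j composite
        have hmflt : j.minFac < j := pv_minFac_lt_of_comp h2j hpj
        have hmfle : 2 ≤ j.minFac := (Nat.minFac_prime (by omega)).two_le
        rcases lt_trichotomy ((j.minFac : Int)) c with hlt | heq | hgt
        · -- already marked: entry is minFac j ≠ j, write skipped
          have hnw : ¬ ((j : Int) ∈ PySem.List.pyRange (c * c) (N + 1) c ∧ j < (N + 1).toNat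
              ∧ l.getD j 0 = (j : Int)) := by
            intro hh
            have := hh.2.2
            rw [hspec j hj, if_pos ⟨h2j, hpj, hlt⟩] at this
            have : j.minFac = j := by exact_mod_cast this
            omega
          rw [if_neg hnw, hspec j hj, if_pos ⟨h2j, hpj, hlt⟩, if_pos ⟨h2j, hpj, by omega⟩]
        · -- newly marked: minFac j = c, j ≥ c², c ∣ j, entry still j
          have hmfc : j.minFac = c.toNat := by omega
          have hsq : j.minFac ^ 2 ≤ j := Nat.minFac_sq_le_self (by omega) hpj
          have hw : ((j : Int) ∈ PySem.List.pyRange (c * c) (N + 1) c ∧ j < (N + 1).toNat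
              ∧ l.getD j 0 = (j : Int)) := by
            refine ⟨hmem.mpr ⟨by nlinarith, hmfc ▸ Nat.minFac_dvd j⟩, hj, ?_⟩
            rw [hspec j hj, if_neg (by intro hh; omega)]
          rw [if_pos hw, if_pos ⟨h2j, hpj, by omega⟩]
          omega
        · -- untouched: c ∤ j since minFac j > c
          have hnw : ¬ ((j : Int) ∈ PySem.List.pyRange (c * c) (N + 1) c ∧ j < (N + 1).toNat
              ∧ l.getD j 0 = (j : Int)) := by
            intro hh
            obtain ⟨hge, hdvd⟩ := hmem.mp hh.1
            have := Nat.minFac_le_of_dvd (by omega) hdvd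
            omega
          rw [if_neg hnw, hspec j hj, if_neg (by intro hh; omega), if_neg (by intro hh; omega)]
  · -- c composite: entry ≠ c, no-op; the spec is unchanged
    rw [if_neg (by
      rw [hread, hvalc, if_pos ⟨by omega, hprime, by
        have := pv_minFac_lt_of_comp (by omega : 2 ≤ c.toNat) hprime
        omega⟩]
      have := pv_minFac_lt_of_comp (by omega : 2 ≤ c.toNat) hprime
      omega)]
    refine ⟨hlen, fun j hj => ?_⟩
    rw [hspec j hj]
    refine if_congr ?_ rfl rfl
    constructor
    · rintro ⟨a, b, hlt⟩
      exact ⟨a, b, by omega⟩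
    · rintro ⟨a, b, hlt⟩
      refine ⟨a, b, ?_⟩
      rcases lt_or_eq_of_le (by omega : (j.minFac : Int) + 1 ≤ c + 1) with h | h
      · omega
      · exfalso
        have : j.minFac = c.toNat := by omega
        exact hprime (this ▸ Nat.minFac_prime (by omega))

theorem pv_sieve_ind (N : Int) (hN : 1 ≤ N) :
    ∀ t : Nat, 2 + (t : Int) ≤ N + 1 →
      pvSieveSpec N (2 + (t : Int))
        ((PySem.List.pyRange 2 (2 + (t : Int)) 1).foldl
          (fun spf i =>
            if PySem.List.pyGetD spf i 0 = i then
              (PySem.List.pyRange (i * i) (N + 1) i).foldl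
                (fun spf j =>
                  if PySem.List.pyGetD spf j 0 = j then PySem.List.pySetD spf j i else spf) spf
            else spf)
          (PySem.List.pyRange 0 (N + 1) 1)) := by
  intro t
  induction t with
  | zero =>
    intro ht
    rw [show (2 + ((0 : Nat) : Int)) = 2 by norm_num,
      PySem.List.pyRange_one_eq_nil (show (2:Int) ≤ 2 from le_refl 2)]
    simp only [List.foldl_nil]
    constructor
    · rw [PySem.List.length_pyRange_one]; norm_num
    · intro j hj
      have hjl : j < (PySem.List.pyRange 0 (N + 1) 1).length := by
        rw [PySem.List.length_pyRange_one]; omega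
      rw [pv_getD_elem hjl, PySem.List.getElem_pyRange_one, if_neg (by
        rintro ⟨hh1, hh2, hh3⟩
        have h2m : 2 ≤ j.minFac := (Nat.minFac_prime (by omega)).two_le
        omega)]
      omega
  | succ t ih =>
    intro ht
    have hsplit : PySem.List.pyRange 2 (2 + ((t + 1 : Nat) : Int)) 1
        = PySem.List.pyRange 2 (2 + (t : Int)) 1 ++ [2 + (t : Int)] := by
      have h2 : (2 + ((t + 1 : Nat) : Int)) = (2 + (t : Int)) + 1 := by push_cast; ring
      rw [h2, PySem.List.pyRange_one_succ_right (by omega)]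
    rw [hsplit, List.foldl_append, List.foldl_cons, List.foldl_nil]
    have hstep := pv_sieve_step N (2 + (t : Int)) hN (by omega) (by push_cast at ht; omega) _
      (ih (by push_cast at ht ⊢; omega))
    have hcast : (2 + ((t + 1 : Nat) : Int)) = 2 + (t : Int) + 1 := by push_cast; ring
    rw [hcast]
    exact hstep

theorem pv_spf_minFac (N : Int) (hN : 1 ≤ N) :
    ∀ j : Nat, 2 ≤ j → j < (N + 1).toNat → (pvB_spf N).getD j 0 = (j.minFac : Int) := by
  intro j h2 hj
  have h := pv_sieve_ind N hN (N - 1).toNat (by omega)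
  have ht : 2 + (((N - 1).toNat : Nat) : Int) = N + 1 := by omega
  rw [ht] at h
  unfold pvB_spf
  rw [h.2 j hj]
  by_cases hp : j.Prime
  · rw [if_neg (by intro hh; exact hh.2.1 hp)]
    rw [Nat.Prime.minFac_eq hp]
  · rw [if_pos ⟨h2, hp, by
      have := pv_minFac_lt_of_comp h2 hp
      omega⟩]

-- Int-level wrappers of the arithmetic functions
def pvSg (n : Int) : Int := ((ArithmeticFunction.sigma 1) n.toNat : Int)
def pvPh (n : Int) : Int := (n.toNat.totient : Int)
def pvTa (n : Int) : Int := ((ArithmeticFunction.sigma 0) n.toNat : Int)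
def pvQf (n : Int) : Int := (pvQnat n.toNat : Int)

theorem pv_A_tausig (N : Int) (_hN : 1 ≤ N) :
    pvA_tausig N = ((PySem.List.pyRange 0 (N + 1) 1).map pvTa,
                    (PySem.List.pyRange 0 (N + 1) 1).map pvSg) := by
  have hsplit : (fun (ts : List Int × List Int) d =>
        (PySem.List.pyRange d (N + 1) d).foldl
          (fun ts m =>
            (PySem.List.pySetD ts.1 m (PySem.List.pyGetD ts.1 m 0 + 1),
             PySem.List.pySetD ts.2 m (PySem.List.pyGetD ts.2 m 0 + d))) ts)
      = (fun ts d =>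
          ((PySem.List.pyRange d (N + 1) d).foldl
            (fun t m => PySem.List.pySetD t m (PySem.List.pyGetD t m 0 + 1)) ts.1,
           (PySem.List.pyRange d (N + 1) d).foldl
            (fun s m => PySem.List.pySetD s m (PySem.List.pyGetD s m 0 + d)) ts.2)) := by
    funext ts d
    obtain ⟨a, b⟩ := ts
    exact PySem.List.foldl_prod_mk
      (fun t m => PySem.List.pySetD t m (PySem.List.pyGetD t m 0 + 1))
      (fun s m => PySem.List.pySetD s m (PySem.List.pyGetD s m 0 + d)) _ a b
  have h2 := PySem.List.foldl_prod_mk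
    (fun (t : List Int) d => (PySem.List.pyRange d (N + 1) d).foldl
      (fun t m => PySem.List.pySetD t m (PySem.List.pyGetD t m 0 + 1)) t)
    (fun (s : List Int) d => (PySem.List.pyRange d (N + 1) d).foldl
      (fun s m => PySem.List.pySetD s m (PySem.List.pyGetD s m 0 + d)) s)
    (PySem.List.pyRange 1 (N + 1) 1)
    (List.replicate (N + 1).toNat 0) (List.replicate (N + 1).toNat 0)
  unfold pvA_tausig
  rw [hsplit, h2]
  have hds : ∀ d ∈ PySem.List.pyRange 1 (N + 1) 1, 0 < d := by
    intro d hd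
    have := PySem.List.mem_pyRange_one.mp hd
    omega
  have hlenrep : (List.replicate (N + 1).toNat (0 : Int)).length = (N + 1).toNat :=
    List.length_replicate
  have side : ∀ (g : Int → Int) (F : Int → Int),
      (∀ j : Nat, ((PySem.List.pyRange 1 ((j : Int) + 1) 1).map
          (fun d => if PySem.Int.mod (j : Int) d = 0 then g d else 0)).sum = F ((j : Int))) →
      (PySem.List.pyRange 1 (N + 1) 1).foldl
        (fun t d => (PySem.List.pyRange d (N + 1) d).foldl
          (fun t m => PySem.List.pySetD t m (PySem.List.pyGetD t m 0 + g d)) t)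
        (List.replicate (N + 1).toNat 0)
      = (PySem.List.pyRange 0 (N + 1) 1).map F := by
    intro g F hF
    refine List.ext_getElem ?_ (fun j hj1 hj2 => ?_)
    · rw [pv_tausig_outer_len N g _ hds, hlenrep, List.length_map,
        PySem.List.length_pyRange_one]
      norm_num
    · have hjsz : j < (N + 1).toNat := by
        rwa [pv_tausig_outer_len N g _ hds, hlenrep] at hj1
      rw [← pv_getD_elem hj1, pv_tausig_outer N g _ hds _ j, List.getElem_map]
      have hjr : j < (PySem.List.pyRange 0 (N + 1) 1).length := by
        rwa [List.length_map] at hj2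
      rw [show (PySem.List.pyRange 0 (N + 1) 1)[j] = ((j : Int)) by
        rw [PySem.List.getElem_pyRange_one]; omega]
      rw [← hF j]
      simp only [List.length_replicate]
      rw [pv_bridge N g j hjsz]
      simp [List.getD_eq_getElem?_getD, hjsz]
  refine Prod.ext ?_ ?_
  · show _ = (PySem.List.pyRange 0 (N + 1) 1).map pvTa
    refine side (fun _ => (1 : Int)) pvTa (fun j => ?_)
    rw [pv_listsum_tau j]
    simp [pvTa]
  · show _ = (PySem.List.pyRange 0 (N + 1) 1).map pvSg
    refine side (fun d => d) pvSg (fun j => ?_)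
    rw [pv_listsum_sigma j]
    simp [pvSg]

theorem pv_A_phi_ind (N : Int) (hN : 1 ≤ N) (spf : List Int)
    (hmf : ∀ j : Nat, 2 ≤ j → j < (N + 1).toNat → spf.getD j 0 = (j.minFac : Int)) :
    ∀ t : Nat, 2 + (t : Int) ≤ N + 1 →
      ((PySem.List.pyRange 2 (2 + (t : Int)) 1).foldl (pvPhiA spf) (pvPhiInitA N)).length
          = (N + 1).toNat ∧
      ∀ j : Nat, (j : Int) < 2 + (t : Int) →
        ((PySem.List.pyRange 2 (2 + (t : Int)) 1).foldl (pvPhiA spf) (pvPhiInitA N)).getD j 0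
          = pvPh ((j : Int)) := by
  intro t
  induction t with
  | zero =>
    intro ht
    rw [show (2 + ((0 : Nat) : Int)) = 2 by norm_num,
      PySem.List.pyRange_one_eq_nil (show (2:Int) ≤ 2 from le_refl 2)]
    simp only [List.foldl_nil]
    have hNlen : 2 ≤ (PySem.List.pyRange 0 (N + 1) 1).length := by
      rw [PySem.List.length_pyRange_one]; omega
    have hlenI : (pvPhiInitA N).length = (N + 1).toNat := by
      unfold pvPhiInitA
      rw [PySem.List.pySetD_of_nonneg _ _ (by omega), PySem.List.pySetD_of_nonneg _ _ (by omega)]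
      rw [List.length_set, List.length_set, PySem.List.length_pyRange_one]
      norm_num
    refine ⟨hlenI, fun j hj => ?_⟩
    unfold pvPhiInitA
    rw [PySem.List.pySetD_of_nonneg _ _ (by omega), PySem.List.pySetD_of_nonneg _ _ (by omega),
      show Int.toNat 0 = 0 from rfl, show Int.toNat 1 = 1 from rfl]
    have hj2 : j < 2 := by omega
    interval_cases j
    · rw [List.getD_eq_getElem?_getD, List.getElem?_set_ne (by omega),
        List.getElem?_set_self (by omega)]
      rfl
    · rw [List.getD_eq_getElem?_getD, List.getElem?_set_self (by rw [List.length_set]; omega)]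
      rfl
  | succ t ih =>
    intro ht
    obtain ⟨ihA, ihEq⟩ := ih (by push_cast at ht ⊢; omega)
    have hsplit : PySem.List.pyRange 2 (2 + ((t + 1 : Nat) : Int)) 1
        = PySem.List.pyRange 2 (2 + (t : Int)) 1 ++ [2 + (t : Int)] := by
      have h2 : (2 + ((t + 1 : Nat) : Int)) = (2 + (t : Int)) + 1 := by push_cast; ring
      rw [h2, PySem.List.pyRange_one_succ_right (by omega)]
    rw [hsplit, List.foldl_append, List.foldl_cons, List.foldl_nil]
    set c : Int := 2 + (t : Int) with hc
    set aC := (PySem.List.pyRange 2 c 1).foldl (pvPhiA spf) (pvPhiInitA N) with haC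
    have hcN : c.toNat < (N + 1).toNat := by omega
    have hct : ((c.toNat : Int)) = c := by omega
    have hc2 : 2 ≤ c.toNat := by omega
    have hgc : PySem.List.pyGetD spf c 0 = (c.toNat.minFac : Int) := by
      rw [PySem.List.pyGetD_of_nonneg _ _ (by omega)]
      exact hmf c.toNat hc2 hcN
    have hmfp : c.toNat.minFac.Prime := Nat.minFac_prime (by omega)
    -- the value written at index c equals pvPh c
    have key : ∃ v : Int, pvPhiA spf aC c = aC.set c.toNat v ∧ v = pvPh c := by
      unfold pvPhiA
      rw [hgc]
      by_cases hp : c.toNat.Prime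
      · rw [if_pos (by rw [Nat.Prime.minFac_eq hp]; omega),
          PySem.List.pySetD_of_nonneg _ _ (by omega)]
        refine ⟨c - 1, rfl, ?_⟩
        unfold pvPh
        rw [Nat.totient_prime hp]
        omega
      · have hmflt : c.toNat.minFac < c.toNat := pv_minFac_lt_of_comp hc2 hp
        rw [if_neg (by omega)]
        dsimp only
        have hmI : PySem.Int.floordiv c ((c.toNat.minFac : Int))
            = ((c.toNat / c.toNat.minFac : Nat) : Int) := by
          rw [← hct]
          exact_mod_cast PySem.Int.floordiv_natCast c.toNat c.toNat.minFac
        have hmlt : c.toNat / c.toNat.minFac < c.toNat :=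
          Nat.div_lt_self (by omega) hmfp.one_lt
        have hread : PySem.List.pyGetD aC ((c.toNat / c.toNat.minFac : Nat) : Int) 0
            = ((c.toNat / c.toNat.minFac).totient : Int) := by
          rw [PySem.List.pyGetD_of_nonneg _ _ (by positivity), Int.toNat_natCast]
          rw [ihEq (c.toNat / c.toNat.minFac) (by omega)]
          unfold pvPh
          rw [Int.toNat_natCast]
        have hmodI : PySem.Int.mod ((c.toNat / c.toNat.minFac : Nat) : Int)
            ((c.toNat.minFac : Int))
            = (((c.toNat / c.toNat.minFac) % c.toNat.minFac : Nat) : Int) :=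
          PySem.Int.mod_natCast (c.toNat / c.toNat.minFac) c.toNat.minFac
        have hcond : (PySem.Int.mod ((c.toNat / c.toNat.minFac : Nat) : Int)
            ((c.toNat.minFac : Int)) = 0) ↔ c.toNat.minFac ∣ c.toNat / c.toNat.minFac := by
          rw [hmodI]
          rw [show ((((c.toNat / c.toNat.minFac) % c.toNat.minFac : Nat) : Int) = 0)
              ↔ ((c.toNat / c.toNat.minFac) % c.toNat.minFac = 0) by exact_mod_cast Iff.rfl]
          exact (Nat.dvd_iff_mod_eq_zero).symm
        rw [hmI]
        by_cases hdvd : c.toNat.minFac ∣ c.toNat / c.toNat.minFac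
        · rw [if_pos (hcond.mpr hdvd), PySem.List.pySetD_of_nonneg _ _ (by omega), hread]
          refine ⟨_, rfl, ?_⟩
          unfold pvPh
          rw [pv_phi_mul_p hc2 hdvd]
          push_cast
          ring
        · rw [if_neg (by rw [hcond]; exact hdvd), PySem.List.pySetD_of_nonneg _ _ (by omega),
            hread]
          refine ⟨_, rfl, ?_⟩
          unfold pvPh
          rw [pv_phi_mul_p1 hc2 hdvd]
          push_cast [Nat.cast_sub (le_of_lt hmfp.one_lt)]
          ring
    obtain ⟨v, hA, hv⟩ := key
    rw [hA]
    refine ⟨by rw [List.length_set]; exact ihA, fun j hj => ?_⟩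
    by_cases hjc : j = c.toNat
    · subst hjc
      rw [List.getD_eq_getElem?_getD, List.getElem?_set_self (by omega), Option.getD_some, hv,
        hct]
    · have hjlt : (j : Int) < c := by
        push_cast at hj
        omega
      rw [List.getD_eq_getElem?_getD, List.getElem?_set_ne (by omega),
        ← List.getD_eq_getElem?_getD]
      exact ihEq j hjlt

theorem pv_A_phi (N : Int) (hN : 1 ≤ N) (spf : List Int)
    (hmf : ∀ j : Nat, 2 ≤ j → j < (N + 1).toNat → spf.getD j 0 = (j.minFac : Int)) :
    pvA_phi N spf = (PySem.List.pyRange 0 (N + 1) 1).map pvPh := by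
  obtain ⟨hlen, hEq⟩ := pv_A_phi_ind N hN spf hmf (N - 1).toNat (by omega)
  have ht : 2 + (((N - 1).toNat : Nat) : Int) = N + 1 := by omega
  rw [ht] at hlen hEq
  rw [pvA_phi_eq_foldl]
  refine List.ext_getElem ?_ (fun j hj1 hj2 => ?_)
  · rw [hlen, List.length_map, PySem.List.length_pyRange_one]
    norm_num
  · have hjsz : j < (N + 1).toNat := by rwa [hlen] at hj1
    have hjr : j < (PySem.List.pyRange 0 (N + 1) 1).length := by
      rwa [List.length_map] at hj2
    rw [← pv_getD_elem hj1, hEq j (by omega), List.getElem_map,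
      show (PySem.List.pyRange 0 (N + 1) 1)[j] = ((j : Int)) by
        rw [PySem.List.getElem_pyRange_one]; omega]

theorem pvSg_natCast (k : Nat) : pvSg ((k : Int)) = ((ArithmeticFunction.sigma 1) k : Int) := by
  unfold pvSg; rw [Int.toNat_natCast]
theorem pvPh_natCast (k : Nat) : pvPh ((k : Int)) = (k.totient : Int) := by
  unfold pvPh; rw [Int.toNat_natCast]
theorem pvTa_natCast (k : Nat) : pvTa ((k : Int)) = ((ArithmeticFunction.sigma 0) k : Int) := by
  unfold pvTa; rw [Int.toNat_natCast]
theorem pvQf_natCast (k : Nat) : pvQf ((k : Int)) = (pvQnat k : Int) := by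
  unfold pvQf; rw [Int.toNat_natCast]

-- the loop body of pvB_main, named for the proofs
def pvBStep (spf : List Int) (st : List Int × List Int × List Int × List Int) (n : Int) :
    List Int × List Int × List Int × List Int :=
  if n = 0 then (st.1 ++ [0], st.2.1 ++ [0], st.2.2.1 ++ [0], st.2.2.2 ++ [0])
  else if n = 1 then (st.1 ++ [1], st.2.1 ++ [1], st.2.2.1 ++ [1], st.2.2.2 ++ [1])
  else
    let p := PySem.List.pyGetD spf n 0
    let m := PySem.Int.floordiv n p
    let q := if PySem.Int.mod m p = 0 then PySem.List.pyGetD st.2.2.2 m 0 * p else p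
    if q = n then
      (st.1 ++ [PySem.List.pyGetD st.1 m 0 + n],
       st.2.1 ++ [n - m],
       st.2.2.1 ++ [PySem.List.pyGetD st.2.2.1 m 0 + 1],
       st.2.2.2 ++ [q])
    else
      let r := PySem.Int.floordiv n q
      (st.1 ++ [PySem.List.pyGetD st.1 r 0 * PySem.List.pyGetD st.1 q 0],
       st.2.1 ++ [PySem.List.pyGetD st.2.1 r 0 * PySem.List.pyGetD st.2.1 q 0],
       st.2.2.1 ++ [PySem.List.pyGetD st.2.2.1 r 0 * PySem.List.pyGetD st.2.2.1 q 0],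
       st.2.2.2 ++ [q])

theorem pvB_main_eq_foldl (N : Int) (spf : List Int) :
    pvB_main N spf = (PySem.List.pyRange 0 (N + 1) 1).foldl (pvBStep spf) ([], [], [], []) := rfl

theorem pv_B_step_maps (N : Int) (spf : List Int)
    (hmf : ∀ j : Nat, 2 ≤ j → j < (N + 1).toNat → spf.getD j 0 = (j.minFac : Int))
    (t : Nat) (htN : (t : Int) ≤ N) :
    pvBStep spf ((PySem.List.pyRange 0 (t : Int) 1).map pvSg,
                 (PySem.List.pyRange 0 (t : Int) 1).map pvPh,
                 (PySem.List.pyRange 0 (t : Int) 1).map pvTa,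
                 (PySem.List.pyRange 0 (t : Int) 1).map pvQf) ((t : Int))
      = ((PySem.List.pyRange 0 (t : Int) 1).map pvSg ++ [pvSg ((t : Int))],
         (PySem.List.pyRange 0 (t : Int) 1).map pvPh ++ [pvPh ((t : Int))],
         (PySem.List.pyRange 0 (t : Int) 1).map pvTa ++ [pvTa ((t : Int))],
         (PySem.List.pyRange 0 (t : Int) 1).map pvQf ++ [pvQf ((t : Int))]) := by
  unfold pvBStep
  by_cases h0 : (t : Int) = 0
  · have ht0 : t = 0 := by exact_mod_cast h0
    subst ht0
    rw [if_pos h0, pvSg_natCast, pvPh_natCast, pvTa_natCast, pvQf_natCast]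
    simp [pvQnat]
  by_cases h1 : (t : Int) = 1
  · have ht1 : t = 1 := by exact_mod_cast h1
    subst ht1
    rw [if_neg h0, if_pos h1, pvSg_natCast, pvPh_natCast, pvTa_natCast, pvQf_natCast]
    simp [pvQnat, ArithmeticFunction.IsMultiplicative.map_one
      ArithmeticFunction.isMultiplicative_sigma]
  have ht2 : 2 ≤ t := by omega
  have htsz : t < (N + 1).toNat := by omega
  have hp : t.minFac.Prime := Nat.minFac_prime (by omega)
  have hread_spf : PySem.List.pyGetD spf ((t : Int)) 0 = ((t.minFac : Nat) : Int) := by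
    rw [PySem.List.pyGetD_of_nonneg _ _ (by positivity), Int.toNat_natCast]
    exact hmf t ht2 htsz
  rw [if_neg h0, if_neg h1]
  dsimp only
  rw [hread_spf, PySem.Int.floordiv_natCast t t.minFac]
  have hmlt : t / t.minFac < t := Nat.div_lt_self (by omega) hp.one_lt
  have hppread : PySem.List.pyGetD ((PySem.List.pyRange 0 ((t : Int)) 1).map pvQf)
      (((t / t.minFac : Nat) : Int)) 0 = pvQf (((t / t.minFac : Nat) : Int)) :=
    PySem.List.pyGetD_map_pyRange_of_nonneg _ _ _ _ (by positivity) (by exact_mod_cast hmlt)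
  have hcond : (PySem.Int.mod (((t / t.minFac : Nat) : Int)) (((t.minFac : Nat) : Int)) = 0)
      ↔ t.minFac ∣ t / t.minFac := by
    rw [PySem.Int.mod_natCast]
    rw [show ((((t / t.minFac) % t.minFac : Nat) : Int) = 0)
        ↔ ((t / t.minFac) % t.minFac = 0) by exact_mod_cast Iff.rfl]
    exact (Nat.dvd_iff_mod_eq_zero).symm
  have hq : (if PySem.Int.mod (((t / t.minFac : Nat) : Int)) (((t.minFac : Nat) : Int)) = 0
      then PySem.List.pyGetD ((PySem.List.pyRange 0 ((t : Int)) 1).map pvQf)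
        (((t / t.minFac : Nat) : Int)) 0 * ((t.minFac : Nat) : Int)
      else ((t.minFac : Nat) : Int)) = ((pvQnat t : Nat) : Int) := by
    by_cases hdvd : t.minFac ∣ t / t.minFac
    · rw [if_pos (hcond.mpr hdvd), hppread, pvQf_natCast, ← Nat.cast_mul,
        ← pv_Q_mul ht2 hdvd]
    · rw [if_neg (fun hh => hdvd (hcond.mp hh)), ← pv_Q_prime ht2 hdvd]
  rw [hq]
  by_cases hqt : pvQnat t = t
  · -- t is a prime power, m = t / minFac
    rw [if_pos (by exact_mod_cast hqt)]
    have hr1 : PySem.List.pyGetD ((PySem.List.pyRange 0 ((t : Int)) 1).map pvSg)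
        (((t / t.minFac : Nat) : Int)) 0 = pvSg (((t / t.minFac : Nat) : Int)) :=
      PySem.List.pyGetD_map_pyRange_of_nonneg _ _ _ _ (by positivity) (by exact_mod_cast hmlt)
    have hr3 : PySem.List.pyGetD ((PySem.List.pyRange 0 ((t : Int)) 1).map pvTa)
        (((t / t.minFac : Nat) : Int)) 0 = pvTa (((t / t.minFac : Nat) : Int)) :=
      PySem.List.pyGetD_map_pyRange_of_nonneg _ _ _ _ (by positivity) (by exact_mod_cast hmlt)
    have hv1 : PySem.List.pyGetD ((PySem.List.pyRange 0 ((t : Int)) 1).map pvSg)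
        (((t / t.minFac : Nat) : Int)) 0 + (t : Int) = pvSg ((t : Int)) := by
      rw [hr1, pvSg_natCast, pvSg_natCast]
      have hs := pv_pp_sigma ht2 hqt 1
      rw [pow_one] at hs
      exact_mod_cast hs.symm
    have hv2 : (t : Int) - (((t / t.minFac : Nat) : Int)) = pvPh ((t : Int)) := by
      rw [pvPh_natCast, pv_pp_phi ht2 hqt,
        Nat.cast_sub (Nat.div_le_self t t.minFac)]
    have hv3 : PySem.List.pyGetD ((PySem.List.pyRange 0 ((t : Int)) 1).map pvTa)
        (((t / t.minFac : Nat) : Int)) 0 + 1 = pvTa ((t : Int)) := by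
      rw [hr3, pvTa_natCast, pvTa_natCast]
      have hs := pv_pp_sigma ht2 hqt 0
      rw [pow_zero] at hs
      exact_mod_cast hs.symm
    have hv4 : ((pvQnat t : Nat) : Int) = pvQf ((t : Int)) := (pvQf_natCast t).symm
    rw [hv1, hv2, hv3, hv4]
  · -- t = q * r with q = pvQnat t a proper factor
    rw [if_neg (by
      intro hh
      exact hqt (by exact_mod_cast hh))]
    have hQdvd : pvQnat t ∣ t := pv_Q_dvd ht2
    have hQ2 : 2 ≤ pvQnat t := pv_Q_two_le ht2
    have hQlt : pvQnat t < t :=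
      lt_of_le_of_ne (Nat.le_of_dvd (by omega) hQdvd) hqt
    have hrlt : t / pvQnat t < t := Nat.div_lt_self (by omega) (by omega)
    rw [PySem.Int.floordiv_natCast t (pvQnat t)]
    have hrd : ∀ f : Int → Int, PySem.List.pyGetD ((PySem.List.pyRange 0 ((t : Int)) 1).map f)
        (((t / pvQnat t : Nat) : Int)) 0 = f (((t / pvQnat t : Nat) : Int)) := fun f =>
      PySem.List.pyGetD_map_pyRange_of_nonneg _ _ _ _ (by positivity) (by exact_mod_cast hrlt)
    have hqd : ∀ f : Int → Int, PySem.List.pyGetD ((PySem.List.pyRange 0 ((t : Int)) 1).map f)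
        (((pvQnat t : Nat) : Int)) 0 = f (((pvQnat t : Nat) : Int)) := fun f =>
      PySem.List.pyGetD_map_pyRange_of_nonneg _ _ _ _ (by positivity) (by exact_mod_cast hQlt)
    have hv1 : PySem.List.pyGetD ((PySem.List.pyRange 0 ((t : Int)) 1).map pvSg)
          (((t / pvQnat t : Nat) : Int)) 0
        * PySem.List.pyGetD ((PySem.List.pyRange 0 ((t : Int)) 1).map pvSg)
          (((pvQnat t : Nat) : Int)) 0 = pvSg ((t : Int)) := by
      rw [hrd pvSg, hqd pvSg, pvSg_natCast, pvSg_natCast, pvSg_natCast]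
      exact_mod_cast (pv_split_sigma ht2 1).symm
    have hv2 : PySem.List.pyGetD ((PySem.List.pyRange 0 ((t : Int)) 1).map pvPh)
          (((t / pvQnat t : Nat) : Int)) 0
        * PySem.List.pyGetD ((PySem.List.pyRange 0 ((t : Int)) 1).map pvPh)
          (((pvQnat t : Nat) : Int)) 0 = pvPh ((t : Int)) := by
      rw [hrd pvPh, hqd pvPh, pvPh_natCast, pvPh_natCast, pvPh_natCast]
      exact_mod_cast (pv_split_phi ht2).symm
    have hv3 : PySem.List.pyGetD ((PySem.List.pyRange 0 ((t : Int)) 1).map pvTa)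
          (((t / pvQnat t : Nat) : Int)) 0
        * PySem.List.pyGetD ((PySem.List.pyRange 0 ((t : Int)) 1).map pvTa)
          (((pvQnat t : Nat) : Int)) 0 = pvTa ((t : Int)) := by
      rw [hrd pvTa, hqd pvTa, pvTa_natCast, pvTa_natCast, pvTa_natCast]
      exact_mod_cast (pv_split_sigma ht2 0).symm
    have hv4 : ((pvQnat t : Nat) : Int) = pvQf ((t : Int)) := (pvQf_natCast t).symm
    rw [hv1, hv2, hv3, hv4]

theorem pv_B_main (N : Int) (hN : 1 ≤ N) (spf : List Int)
    (hmf : ∀ j : Nat, 2 ≤ j → j < (N + 1).toNat → spf.getD j 0 = (j.minFac : Int)) :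
    pvB_main N spf = ((PySem.List.pyRange 0 (N + 1) 1).map pvSg,
                      (PySem.List.pyRange 0 (N + 1) 1).map pvPh,
                      (PySem.List.pyRange 0 (N + 1) 1).map pvTa,
                      (PySem.List.pyRange 0 (N + 1) 1).map pvQf) := by
  rw [pvB_main_eq_foldl]
  have main : ∀ t : Nat, (t : Int) ≤ N + 1 →
      (PySem.List.pyRange 0 (t : Int) 1).foldl (pvBStep spf) ([], [], [], [])
        = ((PySem.List.pyRange 0 (t : Int) 1).map pvSg,
           (PySem.List.pyRange 0 (t : Int) 1).map pvPh,
           (PySem.List.pyRange 0 (t : Int) 1).map pvTa,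
           (PySem.List.pyRange 0 (t : Int) 1).map pvQf) := by
    intro t
    induction t with
    | zero =>
      intro _
      rw [show ((0 : Nat) : Int) = 0 by norm_num,
        PySem.List.pyRange_one_eq_nil (le_refl 0)]
      rfl
    | succ t ih =>
      intro ht
      have hc : ((t + 1 : Nat) : Int) = (t : Int) + 1 := by push_cast; ring
      have hsplit : PySem.List.pyRange 0 ((t + 1 : Nat) : Int) 1
          = PySem.List.pyRange 0 (t : Int) 1 ++ [(t : Int)] := by
        rw [hc, PySem.List.pyRange_one_succ_right (by positivity)]
      rw [hsplit, List.foldl_append, ih (by omega), List.foldl_cons, List.foldl_nil,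
        List.map_append, List.map_append, List.map_append, List.map_append]
      exact pv_B_step_maps N spf hmf t (by omega)
  have := main (N + 1).toNat (by omega)
  rw [show (((N + 1).toNat : Nat) : Int) = N + 1 by omega] at this
  exact this

-- ===== VERDICT (by name: the statement is the Claim_ definition above) =====
theorem compute_arithmetic_functions_spec : Claim_equal_compute_arithmetic_functions := by
  intro N _ hPre
  show _ = _
  unfold compute_arithmetic_functions compute_arithmetic_functions_alt
  rw [pv_A_tausig N hPre, pv_spf_eq N hPre,
    pv_A_phi N hPre (pvB_spf N) (pv_spf_minFac N hPre),
    pv_B_main N hPre (pvB_spf N) (pv_spf_minFac N hPre)]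

@[simp]
theorem compute_arithmetic_functions_raises : Claim_raises_compute_arithmetic_functions := by
  unfold Claim_raises_compute_arithmetic_functions
  exact ⟨fun N _ h => by
    unfold Raises_compute_arithmetic_functions at h
    unfold Pre_compute_arithmetic_functions; omega, by decide⟩
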